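-- pv_equiv track=rewrite | github.com/victorreisenauer/BushNet | utils/data.py | find_size_fit
-- ===== SOURCE A (Python) =====
-- def find_size_fit(wanted_size, img_size):
--     img_width = img_size[0]
--     img_height = img_size[1]
--     while img_height % wanted_size[0] != 0:
--         img_height -= 1
--     while img_width % wanted_size[1] != 0:
--         img_width -= 1
--     return img_width, img_height
-- ===== SOURCE B (Python) =====
-- def find_size_fit(wanted_size, img_size):
--     h_step = abs(wanted_size[0])
--     w_step = abs(wanted_size[1])
--     return (img_size[0] - img_size[0] % w_step,
--             img_size[1] - img_size[1] % h_step)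
-- ===== Notes on version B (the rewrite author's own statement) =====
-- stated objective: faster
-- what changed: replaces the two decrement-until-divisible while loops by the closed form img - img % |wanted| (Python floor mod), computing each dimension in O(1) instead of O(wanted_size) steps
import Mathlib
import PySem

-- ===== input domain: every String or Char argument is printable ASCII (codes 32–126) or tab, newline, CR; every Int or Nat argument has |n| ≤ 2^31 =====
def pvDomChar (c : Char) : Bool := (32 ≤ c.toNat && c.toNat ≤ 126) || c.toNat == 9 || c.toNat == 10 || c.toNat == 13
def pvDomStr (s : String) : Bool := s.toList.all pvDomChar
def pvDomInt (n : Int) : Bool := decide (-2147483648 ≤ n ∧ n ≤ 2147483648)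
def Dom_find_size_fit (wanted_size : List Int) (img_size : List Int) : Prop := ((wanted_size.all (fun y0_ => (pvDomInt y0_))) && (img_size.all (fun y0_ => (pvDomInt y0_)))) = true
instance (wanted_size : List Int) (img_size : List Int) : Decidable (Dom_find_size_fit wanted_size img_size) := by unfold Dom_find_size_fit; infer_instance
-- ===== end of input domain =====

-- B replaces A's two decrement-until-divisible while loops by the closed form
-- img - img % |wanted| (Python floor mod), O(1) per dimension (objective: faster).

-- ===== PORT A =====
-- the while loop 'while x % w != 0: x -= 1', run with a fuel bound that only makes
-- the recursion total: fuel (x mod |w|)+1 is exactly the number of iterations left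
-- when w ≠ 0 (Python raises ZeroDivisionError at w = 0; excluded by Pre_)
def pyWhileDownFuel : Nat → Int → Int → Int
  | 0, _, x => x
  | n + 1, w, x => if PySem.Int.mod x w ≠ 0 then pyWhileDownFuel n w (x - 1) else x

def pyWhileDown (w : Int) (x : Int) : Int :=
  pyWhileDownFuel ((PySem.Int.mod x |w|).toNat + 1) w x

def find_size_fit (wanted_size : List Int) (img_size : List Int) : List Int :=
  let img_width := (PySem.List.pyGet? img_size 0).getD 0
  let img_height := (PySem.List.pyGet? img_size 1).getD 0
  let img_height := pyWhileDown ((PySem.List.pyGet? wanted_size 0).getD 0) img_height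
  let img_width := pyWhileDown ((PySem.List.pyGet? wanted_size 1).getD 0) img_width
  [img_width, img_height]

-- ===== PORT B =====
def find_size_fit_alt (wanted_size : List Int) (img_size : List Int) : List Int :=
  let h_step := |(PySem.List.pyGet? wanted_size 0).getD 0|
  let w_step := |(PySem.List.pyGet? wanted_size 1).getD 0|
  let iw := (PySem.List.pyGet? img_size 0).getD 0
  let ih := (PySem.List.pyGet? img_size 1).getD 0
  [iw - PySem.Int.mod iw w_step, ih - PySem.Int.mod ih h_step]

-- ===== PRECONDITION & SPEC =====
-- Pre_ excludes exactly the inputs where the Python A raises: lists shorter than 2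
-- (IndexError) and a zero in wanted_size[0]/[1] (ZeroDivisionError).
def Pre_find_size_fit (wanted_size : List Int) (img_size : List Int) : Prop :=
  2 ≤ wanted_size.length ∧ 2 ≤ img_size.length ∧
  (PySem.List.pyGet? wanted_size 0).getD 0 ≠ 0 ∧ (PySem.List.pyGet? wanted_size 1).getD 0 ≠ 0
instance (wanted_size : List Int) (img_size : List Int) : Decidable (Pre_find_size_fit wanted_size img_size) := by unfold Pre_find_size_fit; infer_instance
def pvWitness_find_size_fit : List Int × List Int := ([3, 5], [17, 23])

def Spec_find_size_fit (wanted_size : List Int) (img_size : List Int) (out : List Int) : Prop := out = find_size_fit_alt wanted_size img_size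
instance (wanted_size : List Int) (img_size : List Int) (out : List Int) : Decidable (Spec_find_size_fit wanted_size img_size out) := by unfold Spec_find_size_fit; infer_instance

-- ===== CLAIM (what is proved, stated in full; the proofs are below) =====
def Claim_equal_find_size_fit : Prop := ∀ (wanted_size : List Int) (img_size : List Int), Dom_find_size_fit wanted_size img_size → Pre_find_size_fit wanted_size img_size → Spec_find_size_fit wanted_size img_size (find_size_fit wanted_size img_size)

-- ===== LEMMAS AND PROOFS =====

-- stepping once: for 0 < n and n ∤ x, (x-1) mod n = (x mod n) - 1
theorem emod_sub_one_step (n x : Int) (hpos : 0 < n) (hne : x % n ≠ 0) :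
    (x - 1) % n = x % n - 1 := by
  have hb1 : 0 ≤ x % n := Int.emod_nonneg x (by omega)
  have hb2 : x % n < n := Int.emod_lt_of_pos x hpos
  conv_lhs => rw [show x - 1 = (x % n - 1) + n * (x / n) by
    have := Int.emod_add_mul_ediv x n; omega]
  rw [Int.add_mul_emod_self_left]
  exact Int.emod_eq_of_lt (by omega) (by omega)

-- with enough fuel the loop lands on the closed form x - (x mod |w|)
theorem pyWhileDownFuel_eq (fuel : Nat) (w x : Int) (hw : w ≠ 0)
    (hf : (PySem.Int.mod x |w|).toNat < fuel) :
    pyWhileDownFuel fuel w x = x - PySem.Int.mod x |w| := by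
  induction fuel generalizing x with
  | zero => omega
  | succ n ih =>
    have hpos : (0:Int) < |w| := abs_pos.mpr hw
    have hm : PySem.Int.mod x |w| = x % |w| := PySem.Int.mod_eq_emod_of_pos hpos
    have hb1 : 0 ≤ x % |w| := Int.emod_nonneg x (by omega)
    rw [pyWhileDownFuel]
    by_cases h : PySem.Int.mod x w = 0
    · simp only [h, ne_eq, not_true_eq_false, if_false]
      have hax : |w| ∣ x := by
        rw [abs_dvd]; exact (PySem.Int.mod_eq_zero_iff_dvd x w).mp h
      have : PySem.Int.mod x |w| = 0 := (PySem.Int.mod_eq_zero_iff_dvd x |w|).mpr hax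
      omega
    · simp only [h, ne_eq, not_false_eq_true, if_true]
      have hd : ¬ (|w| ∣ x) := by
        rw [abs_dvd]; exact fun hdvd => h ((PySem.Int.mod_eq_zero_iff_dvd x w).mpr hdvd)
      have hne : x % |w| ≠ 0 := fun h0 => hd (Int.dvd_of_emod_eq_zero h0)
      have hm' : PySem.Int.mod (x - 1) |w| = (x - 1) % |w| := PySem.Int.mod_eq_emod_of_pos hpos
      have hstep : (x - 1) % |w| = x % |w| - 1 := emod_sub_one_step |w| x hpos hne
      rw [ih (x - 1) (by omega)]
      omega

theorem pyWhileDown_eq (w x : Int) (hw : w ≠ 0) :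
    pyWhileDown w x = x - PySem.Int.mod x |w| := by
  exact pyWhileDownFuel_eq _ w x hw (by omega)

-- ===== VERDICT (by name: the statement is the Claim_ definition above) =====
theorem find_size_fit_spec : Claim_equal_find_size_fit := by
  intro ws im _ hpre
  obtain ⟨_, _, h0, h1⟩ := hpre
  unfold Spec_find_size_fit find_size_fit find_size_fit_alt
  simp only [pyWhileDown_eq _ _ h0, pyWhileDown_eq _ _ h1]
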